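-- pv_equiv track=rewrite | github.com/locbp-uzh/biopipelines | HelpScripts/pipe_fuse_queries.py | parse_length_spec
-- ===== SOURCE A (Python) =====
-- from typing import List, Dict, Any
--
-- def parse_length_spec(spec: str) -> List[int]:
--     """
--     Parse length specification like '1-6' or '3+5-7'.
--
--     Args:
--         spec: Length specification string
--
--     Returns:
--         List of integer lengths
--     """
--     lengths = []
--     if '+' in spec:
--         for part in spec.split('+'):
--             lengths.extend(parse_length_spec(part.strip()))
--     elif '-' in spec and not spec.startswith('-'):
--         if spec.count('-') == 1:
--             start, end = map(int, spec.split('-'))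
--             lengths.extend(range(start, end + 1))
--         else:
--             lengths.append(int(spec))
--     else:
--         lengths.append(int(spec))
--     return lengths
-- ===== SOURCE B (Python) =====
-- from typing import List
--
--
-- def parse_length_spec(spec: str) -> List[int]:
--     """Flat one-pass version: split on '+' once (stripping only those parts,
--     as the original does), then handle each part with the range/int rule."""
--     parts = [p.strip() for p in spec.split('+')] if '+' in spec else [spec]
--     lengths: List[int] = []
--     for part in parts:
--         if '-' in part and not part.startswith('-') and part.count('-') == 1:
--             start, end = map(int, part.split('-'))
--             lengths.extend(range(start, end + 1))
--         else:
--             lengths.append(int(part))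
--     return lengths
-- ===== Notes on version B (the rewrite author's own statement) =====
-- stated objective: simpler
-- what changed: Replaces the self-recursive descent on '+' with a single flat pass: one split on '+' (stripping only those parts, like the original), then one loop applying the range/int rule to each part.
import Mathlib
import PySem

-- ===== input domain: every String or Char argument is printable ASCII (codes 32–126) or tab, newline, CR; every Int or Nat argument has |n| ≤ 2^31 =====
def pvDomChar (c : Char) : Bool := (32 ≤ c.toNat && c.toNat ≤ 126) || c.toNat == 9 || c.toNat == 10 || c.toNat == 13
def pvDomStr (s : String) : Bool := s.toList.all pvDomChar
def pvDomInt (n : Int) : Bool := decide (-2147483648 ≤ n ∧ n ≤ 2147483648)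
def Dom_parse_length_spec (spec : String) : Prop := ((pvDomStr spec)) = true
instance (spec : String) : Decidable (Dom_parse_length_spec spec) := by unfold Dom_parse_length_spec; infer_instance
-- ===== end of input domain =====

-- B replaces A's self-recursion on '+' by one flat split-then-loop pass (same cost, simpler shape).


-- ===== PORT A =====
-- recursion of A made total by a fuel counter (spec shrinks on every recursive call,
-- fuel = length + 1 is always enough; the 0-branch is unreachable)
def plsAGo : Nat → String → List Int
  | 0, _ => []
  | fuel+1, spec =>
    if PySem.Str.isIn "+" spec then
      ((PySem.Str.split? spec "+").getD []).foldl
        (fun lengths part => lengths ++ plsAGo fuel (PySem.Str.strip part)) []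
    else if PySem.Str.isIn "-" spec && !(PySem.Str.startswith spec "-") then
      if PySem.Str.count spec "-" == 1 then
        match (PySem.Str.split? spec "-").getD [] with
        | [a, b] =>
          match PySem.Int.ofStr? a, PySem.Int.ofStr? b with
          | some s, some e => PySem.List.pyRange s (e + 1) 1
          | _, _ => []   -- int() raised: outside Pre_
        | _ => []
      else [(PySem.Int.ofStr? spec).getD 0]   -- getD: int() raised, outside Pre_
    else [(PySem.Int.ofStr? spec).getD 0]

def parse_length_spec (spec : String) : List Int :=
  plsAGo (spec.toList.length + 1) spec

-- ===== PORT B =====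
def parse_length_spec_alt (spec : String) : List Int :=
  let parts : List String :=
    if PySem.Str.isIn "+" spec then
      ((PySem.Str.split? spec "+").getD []).map (fun p => PySem.Str.strip p)
    else [spec]
  parts.foldl (fun lengths part =>
    if PySem.Str.isIn "-" part && !(PySem.Str.startswith part "-")
        && PySem.Str.count part "-" == 1 then
      match (PySem.Str.split? part "-").getD [] with
      | [a, b] =>
        match PySem.Int.ofStr? a, PySem.Int.ofStr? b with
        | some s, some e => lengths ++ PySem.List.pyRange s (e + 1) 1
        | _, _ => lengths   -- int() raised: outside Pre_
      | _ => lengths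
    else lengths ++ [(PySem.Int.ofStr? part).getD 0]) []   -- getD: int() raised, outside Pre_

-- ===== PRECONDITION & SPEC =====
-- a part is parsed without a ValueError: either a valid 'start-end' range or a valid int literal
def pvOkPart (p : String) : Bool :=
  if PySem.Str.isIn "-" p && !(PySem.Str.startswith p "-")
      && PySem.Str.count p "-" == 1 then
    match (PySem.Str.split? p "-").getD [] with
    | [a, b] => (PySem.Int.ofStr? a).isSome && (PySem.Int.ofStr? b).isSome
    | _ => false
  else (PySem.Int.ofStr? p).isSome

-- Pre_ excludes exactly the inputs where Python's int() raises ValueError in A (B raises there too)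
def Pre_parse_length_spec (spec : String) : Prop :=
  ((if PySem.Str.isIn "+" spec then
      ((PySem.Str.split? spec "+").getD []).map (fun p => PySem.Str.strip p)
    else [spec]).all pvOkPart) = true
instance (spec : String) : Decidable (Pre_parse_length_spec spec) := by
  unfold Pre_parse_length_spec; infer_instance

def pvWitness_parse_length_spec : String := "3+5-7"

def Spec_parse_length_spec (spec : String) (out : List Int) : Prop := out = parse_length_spec_alt spec
instance (spec : String) (out : List Int) : Decidable (Spec_parse_length_spec spec out) := by
  unfold Spec_parse_length_spec; infer_instance

-- ===== CLAIM (what is proved, stated in full; the proofs are below) =====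
def Claim_equal_parse_length_spec : Prop := ∀ (spec : String), Dom_parse_length_spec spec → Pre_parse_length_spec spec → Spec_parse_length_spec spec (parse_length_spec spec)

-- ===== LEMMAS AND PROOFS =====

-- B's per-part step, factored out for the proofs only
def plsBase (q : String) : List Int :=
  if PySem.Str.isIn "-" q && !(PySem.Str.startswith q "-")
      && PySem.Str.count q "-" == 1 then
    match (PySem.Str.split? q "-").getD [] with
    | [a, b] =>
      match PySem.Int.ofStr? a, PySem.Int.ofStr? b with
      | some s, some e => PySem.List.pyRange s (e + 1) 1
      | _, _ => []
    | _ => []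
  else [(PySem.Int.ofStr? q).getD 0]

lemma singleton_infix_iff_mem {α : Type} (a : α) (l : List α) : [a] <:+: l ↔ a ∈ l := by
  constructor
  · intro h; exact h.subset (List.mem_singleton_self a)
  · intro h
    obtain ⟨s, t, rfl⟩ := List.append_of_mem h
    exact ⟨s, t, by simp⟩

lemma go_plus_free (fuel : Nat) : ∀ (l cur : List Char) (acc : List (List Char)),
    l.length < fuel → (∀ p ∈ acc, '+' ∉ p) → '+' ∉ cur →
    ∀ p ∈ PySem.Chars.splitOn.go ['+'] fuel l cur acc, '+' ∉ p := by
  induction fuel with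
  | zero => intro l cur acc h; omega
  | succ fuel ih =>
    intro l cur acc hlen hacc hcur p hp
    cases l with
    | nil =>
      simp only [PySem.Chars.splitOn.go, List.mem_reverse] at hp
      rcases List.mem_cons.mp hp with h | h
      · subst h; simpa using hcur
      · exact hacc p h
    | cons c rest =>
      by_cases hc : c = '+'
      · subst hc
        simp only [PySem.Chars.splitOn.go, List.isPrefixOf, beq_self_eq_true, Bool.true_and,
          if_pos] at hp
        refine ih rest [] (cur.reverse :: acc) (by simpa using hlen) ?_ (by simp) p hp
        intro q hq
        rcases List.mem_cons.mp hq with h | h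
        · subst h; simpa using hcur
        · exact hacc q h
      · have hpre : [('+' : Char)].isPrefixOf (c :: rest) = false := by
          simp [List.isPrefixOf]; exact fun h => hc h.symm
        simp only [PySem.Chars.splitOn.go, hpre, Bool.false_eq_true, if_false] at hp
        refine ih rest (c :: cur) acc (by simpa using hlen) hacc ?_ p hp
        intro h
        rcases List.mem_cons.mp h with h | h
        · exact hc h.symm
        · exact hcur h

lemma splitOn_plus_free (s : List Char) : ∀ p ∈ PySem.Chars.splitOn s ['+'], '+' ∉ p := by
  intro p hp
  exact go_plus_free (s.length + 1) s [] [] (by omega) (by simp) (by simp) p hp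

lemma strip_plus_free (cs : List Char) (h : '+' ∉ cs) : '+' ∉ PySem.Chars.strip cs := by
  intro hmem
  apply h
  unfold PySem.Chars.strip PySem.Chars.rstrip PySem.Chars.lstrip at hmem
  simp only [List.mem_reverse] at hmem
  have h1 := (List.dropWhile_sublist (l := (List.dropWhile PySem.Chars.isspace cs).reverse)
    (p := PySem.Chars.isspace)).subset hmem
  simp only [List.mem_reverse] at h1
  exact (List.dropWhile_sublist (l := cs) (p := PySem.Chars.isspace)).subset h1

lemma part_strip_no_plus (spec : String) (part : String)
    (hp : part ∈ (PySem.Str.split? spec "+").getD []) :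
    PySem.Str.isIn "+" (PySem.Str.strip part) = false := by
  have hsplit : (PySem.Str.split? spec "+").getD []
      = (PySem.Chars.splitOn spec.toList ['+']).map String.ofList := by
    simp [PySem.Str.split?, PySem.Chars.split?]
  rw [hsplit, List.mem_map] at hp
  obtain ⟨cs, hcs, rfl⟩ := hp
  have hfree : '+' ∉ cs := splitOn_plus_free spec.toList cs hcs
  have : PySem.Chars.isIn "+".toList (PySem.Str.strip (String.ofList cs)).toList = false := by
    rw [PySem.Str.toList_strip]
    rw [Bool.eq_false_iff]
    intro h
    have := (PySem.Chars.isIn_iff_infix _ _).mp h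
    have hmem : '+' ∈ PySem.Chars.strip (String.ofList cs).toList :=
      (singleton_infix_iff_mem _ _).mp (by simpa using this)
    exact strip_plus_free _ (by simpa using hfree) hmem
  rw [PySem.Str.isIn_eq]
  exact this

lemma go_plus (fuel : Nat) (spec : String) (h : PySem.Str.isIn "+" spec = true) :
    plsAGo (fuel + 1) spec
      = ((PySem.Str.split? spec "+").getD []).foldl
          (fun lengths part => lengths ++ plsAGo fuel (PySem.Str.strip part)) [] := by
  conv_lhs => rw [plsAGo]
  rw [if_pos h]

lemma go_base (fuel : Nat) (q : String) (h : PySem.Str.isIn "+" q = false) :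
    plsAGo (fuel + 1) q = plsBase q := by
  conv_lhs => rw [plsAGo]
  rw [h]
  simp only [Bool.false_eq_true, if_false, plsBase]
  by_cases h1 : (PySem.Str.isIn "-" q && !(PySem.Str.startswith q "-")) = true
  · rw [if_pos h1]
    by_cases h2 : (PySem.Str.count q "-" == 1) = true
    · rw [if_pos h2, if_pos (by simp_all)]
    · rw [if_neg h2, if_neg (by simp_all)]
  · rw [if_neg h1, if_neg (by simp_all)]

lemma step_eq (lengths : List Int) (q : String) :
    (if PySem.Str.isIn "-" q && !(PySem.Str.startswith q "-")
        && PySem.Str.count q "-" == 1 then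
      match (PySem.Str.split? q "-").getD [] with
      | [a, b] =>
        match PySem.Int.ofStr? a, PySem.Int.ofStr? b with
        | some s, some e => lengths ++ PySem.List.pyRange s (e + 1) 1
        | _, _ => lengths
      | _ => lengths
    else lengths ++ [(PySem.Int.ofStr? q).getD 0])
    = lengths ++ plsBase q := by
  simp only [plsBase]
  by_cases h : (PySem.Str.isIn "-" q && !(PySem.Str.startswith q "-")
      && PySem.Str.count q "-" == 1) = true
  · rw [if_pos h, if_pos h]
    cases hs : (PySem.Str.split? q "-").getD [] with
    | nil => simp
    | cons a t =>
      cases t with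
      | nil => simp
      | cons b t2 =>
        cases t2 with
        | nil =>
          cases ha : PySem.Int.ofStr? a <;> cases hb : PySem.Int.ofStr? b <;> simp [ha, hb]
        | cons c t3 => simp
  · rw [if_neg h, if_neg h]

-- ===== VERDICT (by name: the statement is the Claim_ definition above) =====
theorem parse_length_spec_spec : Claim_equal_parse_length_spec := by
  intro spec _ _
  unfold Spec_parse_length_spec parse_length_spec parse_length_spec_alt
  by_cases h : PySem.Str.isIn "+" spec = true
  · rw [if_pos h]
    have hne : spec.toList ≠ [] := by
      intro he
      have h2 := (PySem.Chars.isIn_iff_infix "+".toList spec.toList).mp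
        (by rw [← PySem.Str.isIn_eq]; exact h)
      rw [he] at h2
      have := List.infix_nil.mp h2
      simp at this
    obtain ⟨m, hm⟩ : ∃ m, spec.toList.length = m + 1 := by
      cases hl : spec.toList with
      | nil => exact absurd hl hne
      | cons a t => exact ⟨t.length, by simp⟩
    rw [go_plus spec.toList.length spec h, hm]
    simp only [List.foldl_map]
    refine PySem.List.foldl_congr_mem _ _ _ _ ?_
    intro acc part hpart
    have h1 := go_base m (PySem.Str.strip part) (part_strip_no_plus spec part hpart)
    simp only [h1, step_eq]
  · rw [if_neg h]
    simp only [List.foldl_cons, List.foldl_nil, step_eq, List.nil_append]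
    exact go_base spec.toList.length spec (Bool.eq_false_iff.mpr h)
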